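-- pv_equiv track=rewrite | github.com/nonameno2/algorithm_study | 7_3_n_arithmetic_operation.py | solution
-- ===== SOURCE A (Python) =====
-- def solution(N, number):
--     if number == N:
--         return 1
--     dp = [set() for _ in range(8)]
--     for i in range(8):
--         dp[i].add(int(str(N) * (i + 1)))
--     for i in range(1, 8):
--         for j in range(i):
--             for num1 in dp[j]:
--                 for num2 in dp[i - j - 1]:
--                     dp[i].add(num1 + num2)
--                     dp[i].add(num1 - num2)
--                     dp[i].add(num1 * num2)
--                     if num2 != 0:
--                         dp[i].add(num1 // num2)
--         if number in dp[i]: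
--             return i + 1
--     return -1
-- ===== SOURCE B (Python) =====
-- def solution(N, number):
--     if number == N:
--         return 1
--     cache = {}
--
--     def reach(k):
--         if k in cache:
--             return cache[k]
--         vals = set()
--         vals.add(int(str(N) * k))
--         for a in range(1, k):
--             for x in reach(a):
--                 for y in reach(k - a):
--                     vals.add(x + y)
--                     vals.add(x - y)
--                     vals.add(x * y)
--                     if y != 0:
--                         vals.add(x // y)
--         cache[k] = vals
--         return vals
--
--     for k in range(2, 9):
--         if number in reach(k):
--             return k
--     return -1
-- ===== Notes on version B (the rewrite author's own statement) =====
-- stated objective: alternative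
-- what changed: Replaces A's bottom-up dp array of 8 set rows with a memoized recursive reach(k) returning the values expressible with exactly k copies of N, scanning k = 1..8 top-down.
import Mathlib
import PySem

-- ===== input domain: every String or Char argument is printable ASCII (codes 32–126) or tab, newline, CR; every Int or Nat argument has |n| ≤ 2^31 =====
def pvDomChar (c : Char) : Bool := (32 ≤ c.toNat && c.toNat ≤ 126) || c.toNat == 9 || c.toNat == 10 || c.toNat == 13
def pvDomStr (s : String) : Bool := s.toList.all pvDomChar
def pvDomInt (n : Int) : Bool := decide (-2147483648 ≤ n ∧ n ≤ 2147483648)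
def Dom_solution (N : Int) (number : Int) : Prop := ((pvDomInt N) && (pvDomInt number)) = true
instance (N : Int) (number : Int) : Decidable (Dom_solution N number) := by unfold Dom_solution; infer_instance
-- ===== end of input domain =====

-- B replaces A's bottom-up dp array with a memoized recursive reach(k) (the cache dict is
-- threaded explicitly through B's port) — objective: alternative.
-- Both ports model Python's int sets with Std.HashSet Int. The sets are consumed only
-- order-insensitively (membership tests and building further sets), so the unspecified
-- iteration order cannot affect the returned Int; a list-backed set would be quadratic in
-- the dp sizes A reaches (~20k elements) and infeasible to evaluate.

-- int(str(N) * k): this exact line occurs in both Pythons; the .getD 0 is only reached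
-- where Python raises ValueError (negative N, k ≥ 2), excluded by Pre_solution.
def pvBase (N : Int) (k : Nat) : Int :=
  (PySem.Int.ofChars? (List.flatten (List.replicate k (PySem.Int.toChars N)))).getD 0

-- the four adds of the shared inner-loop body (identical four lines in both Pythons)
def pvAddOps (vals : Std.HashSet Int) (x y : Int) : Std.HashSet Int :=
  let v := ((vals.insert (x + y)).insert (x - y)).insert (x * y)
  if y ≠ 0 then v.insert (PySem.Int.floordiv x y) else v

-- for x in s1: for y in s2: pvAddOps …   (shared two inner loops of both Pythons)
def pvCombine (vals s1 s2 : Std.HashSet Int) : Std.HashSet Int :=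
  s1.fold (fun vals x => s2.fold (fun vals y => pvAddOps vals x y) vals) vals

-- ===== PORT A =====
-- dp[i] is built when the i-loop reaches it (its base element first, as the first loop put it there);
-- `done` carries dp[0..i-1].
def buildRowA (N : Int) (done : List (Std.HashSet Int)) (i : Nat) : Std.HashSet Int :=
  (List.range i).foldl
    (fun s j => pvCombine s (done.getD j ∅) (done.getD (i - j - 1) ∅))
    (Std.HashSet.insert ∅ (pvBase N (i + 1)))

-- for i in range(1, 8): … if number in dp[i]: return i + 1 … return -1
def scanA (N number : Int) (done : List (Std.HashSet Int)) (i : Nat) : Int :=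
  if i < 8 then
    let row := buildRowA N done i
    if number ∈ row then (i : Int) + 1 else scanA N number (done ++ [row]) (i + 1)
  else -1
termination_by 8 - i

def solution (N : Int) (number : Int) : Int :=
  if number = N then 1
  else scanA N number [Std.HashSet.insert ∅ (pvBase N 1)] 1

-- ===== PORT B =====
-- reach(k) with its memoization dict `cache` threaded through (Python's closure cell);
-- returns the set together with the updated cache; `(reachC …).1/.2` are Python's x, cache
def reachC (N : Int) (k : Nat) (cache : PySem.Dict Nat (Std.HashSet Int)) :
    Std.HashSet Int × PySem.Dict Nat (Std.HashSet Int) :=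
  match cache.get? k with
  | some s => (s, cache)
  | none =>
    let p := (List.range' 1 (k - 1)).attach.foldl
      (fun (p : Std.HashSet Int × PySem.Dict Nat (Std.HashSet Int)) a =>
        (pvCombine p.1 (reachC N a.1 p.2).1 (reachC N (k - a.1) (reachC N a.1 p.2).2).1,
         (reachC N (k - a.1) (reachC N a.1 p.2).2).2))
      (Std.HashSet.insert ∅ (pvBase N k), cache)
    (p.1, p.2.insert k p.1)
termination_by k
decreasing_by
  · have := List.mem_range'_1.mp a.2; omega
  · have := List.mem_range'_1.mp a.2; omega

-- for k in range(2, 9): if number in reach(k): return k … return -1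
def scanB (N number : Int) (k : Nat) (cache : PySem.Dict Nat (Std.HashSet Int)) : Int :=
  if k < 9 then
    let sc := reachC N k cache
    if number ∈ sc.1 then (k : Int) else scanB N number (k + 1) sc.2
  else -1
termination_by 9 - k

def solution_alt (N : Int) (number : Int) : Int :=
  if number = N then 1 else scanB N number 2 PySem.Dict.empty

-- ===== PRECONDITION & SPEC =====
-- Pre_ excludes exactly the inputs where Python A raises ValueError: int(str(N)*k) with
-- negative N and k ≥ 2 (reached whenever number ≠ N); Python B raises there too.
-- (Both ports share pvBase, so the ported equivalence happens to hold even outside Pre_;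
-- Pre_ is stated because the two Pythons raise rather than return there.)
def Pre_solution (N : Int) (number : Int) : Prop := number = N ∨ 0 ≤ N
instance (N : Int) (number : Int) : Decidable (Pre_solution N number) := by
  unfold Pre_solution; infer_instance

def pvWitness_solution : Int × Int := (5, 12)

def Spec_solution (N : Int) (number : Int) (out : Int) : Prop := out = solution_alt N number
instance (N : Int) (number : Int) (out : Int) : Decidable (Spec_solution N number out) := by
  unfold Spec_solution; infer_instance

-- ===== CLAIM (what is proved, stated in full; the proofs are below) =====
def Claim_equal_solution : Prop := ∀ (N : Int) (number : Int), Dom_solution N number →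
  Pre_solution N number → Spec_solution N number (solution N number)

-- ===== LEMMAS AND PROOFS =====

-- the pure (cache-free) value of reach(k): what reachC computes, used only by the proofs
def reachP (N : Int) (k : Nat) : Std.HashSet Int :=
  (List.range' 1 (k - 1)).attach.foldl
    (fun vals a => pvCombine vals (reachP N a.1) (reachP N (k - a.1)))
    (Std.HashSet.insert ∅ (pvBase N k))
termination_by k
decreasing_by
  · have := List.mem_range'_1.mp a.2; omega
  · have := List.mem_range'_1.mp a.2; omega

-- cache invariant: every stored entry is the pure reach value of its key
def InvC (N : Int) (c : PySem.Dict Nat (Std.HashSet Int)) : Prop :=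
  ∀ j s, c.get? j = some s → s = reachP N j

lemma invC_empty (N : Int) : InvC N PySem.Dict.empty := by
  intro j s h
  simp [PySem.Dict.get?_empty] at h

lemma foldl_pair_spec (N : Int) (k : Nat)
    (ih : ∀ m, m < k → ∀ c, InvC N c →
      (reachC N m c).1 = reachP N m ∧ InvC N (reachC N m c).2) :
    ∀ (l : List Nat), (∀ a ∈ l, 0 < a ∧ a < k) →
    ∀ (v : Std.HashSet Int) (c : PySem.Dict Nat (Std.HashSet Int)), InvC N c →
      (l.foldl (fun p a =>
          (pvCombine p.1 (reachC N a p.2).1 (reachC N (k - a) (reachC N a p.2).2).1,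
           (reachC N (k - a) (reachC N a p.2).2).2)) (v, c)).1
        = l.foldl (fun v a => pvCombine v (reachP N a) (reachP N (k - a))) v
      ∧ InvC N ((l.foldl (fun p a =>
          (pvCombine p.1 (reachC N a p.2).1 (reachC N (k - a) (reachC N a p.2).2).1,
           (reachC N (k - a) (reachC N a p.2).2).2)) (v, c)).2) := by
  intro l
  induction l with
  | nil => intro _ v c hc; exact ⟨rfl, hc⟩
  | cons a t iht =>
    intro hmem v c hc
    have ha := hmem a (by simp)
    obtain ⟨hx, hc1⟩ := ih a ha.2 c hc
    obtain ⟨hy, hc2⟩ := ih (k - a) (by omega) _ hc1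
    simp only [List.foldl_cons, hx, hy]
    exact iht (fun b hb => hmem b (by simp [hb])) _ _ hc2

lemma reachC_spec (N : Int) :
    ∀ k c, InvC N c → (reachC N k c).1 = reachP N k ∧ InvC N (reachC N k c).2 := by
  intro k
  induction k using Nat.strong_induction_on with
  | _ k ih =>
    intro c hc
    rw [reachC]
    cases hg : c.get? k with
    | some s =>
      exact ⟨hc k s hg, hc⟩
    | none =>
      rw [List.foldl_attach
        (f := fun p a =>
          (pvCombine p.1 (reachC N a p.2).1 (reachC N (k - a) (reachC N a p.2).2).1,
           (reachC N (k - a) (reachC N a p.2).2).2))]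
      obtain ⟨h1, h2⟩ := foldl_pair_spec N k ih (List.range' 1 (k - 1))
        (fun a ha => by have := List.mem_range'_1.mp ha; omega)
        (Std.HashSet.insert ∅ (pvBase N k)) c hc
      have hpure : (List.range' 1 (k - 1)).foldl
          (fun v a => pvCombine v (reachP N a) (reachP N (k - a)))
          (Std.HashSet.insert ∅ (pvBase N k)) = reachP N k := by
        rw [reachP]
        rw [List.foldl_attach (f := fun v a => pvCombine v (reachP N a) (reachP N (k - a)))]
      refine ⟨by rw [h1, hpure], ?_⟩
      intro j s hs
      rw [PySem.Dict.get?_insert] at hs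
      by_cases hj : j = k
      · subst hj
        simp only [if_true] at hs
        rw [← Option.some_inj.mp hs, h1, hpure]
      · simp only [hj, if_false] at hs
        exact h2 j s hs

-- rows A has completed so far, expressed through the pure reach
def doneI (N : Int) (i : Nat) : List (Std.HashSet Int) :=
  (List.range i).map (fun j => reachP N (j + 1))

lemma doneI_getD (N : Int) (i j : Nat) (h : j < i) :
    (doneI N i).getD j ∅ = reachP N (j + 1) := by
  unfold doneI
  rw [List.getD_eq_getElem _ _ (by simpa using h)]
  simp

lemma row_eq (N : Int) (i : Nat) : buildRowA N (doneI N i) i = reachP N (i + 1) := by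
  rw [reachP]
  rw [List.foldl_attach (f := fun vals x => pvCombine vals (reachP N x) (reachP N (i + 1 - x)))]
  unfold buildRowA
  rw [show List.range' 1 (i + 1 - 1) = (List.range i).map (· + 1) by
        simp [List.range'_eq_map_range, Nat.add_comm]]
  rw [List.foldl_map]
  apply PySem.List.foldl_congr_mem
  intro s j hj
  have hji : j < i := List.mem_range.mp hj
  rw [doneI_getD N i j hji, doneI_getD N i (i - j - 1) (by omega)]
  have : i - j - 1 + 1 = i + 1 - (j + 1) := by omega
  rw [this]

lemma scan_eq (N number : Int) :
    ∀ m i c, i + m = 8 → InvC N c →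
      scanA N number (doneI N i) i = scanB N number (i + 1) c := by
  intro m
  induction m with
  | zero =>
    intro i c hi _
    rw [scanA, scanB]
    simp [show ¬ i < 8 by omega, show ¬ i + 1 < 9 by omega]
  | succ m ihm =>
    intro i c hi hc
    rw [scanA, scanB]
    have h8 : i < 8 := by omega
    obtain ⟨h1, h2⟩ := reachC_spec N (i + 1) c hc
    simp only [h8, if_true, show i + 1 < 9 by omega, if_true, row_eq N i, h1]
    by_cases hm : number ∈ reachP N (i + 1)
    · simp [hm]
    · simp only [hm, if_false]
      have hd : doneI N i ++ [reachP N (i + 1)] = doneI N (i + 1) := by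
        unfold doneI
        rw [List.range_succ]
        simp
      rw [hd]
      exact ihm (i + 1) _ (by omega) h2

-- ===== VERDICT (by name: the statement is the Claim_ definition above) =====
theorem solution_spec : Claim_equal_solution := by
  intro N number _ _
  unfold Spec_solution solution solution_alt
  by_cases h : number = N
  · simp [h]
  · simp only [h, if_false]
    have h1 : [Std.HashSet.insert ∅ (pvBase N 1)] = doneI N 1 := by
      unfold doneI
      have : reachP N 1 = Std.HashSet.insert ∅ (pvBase N 1) := by
        rw [reachP]; rfl
      simp [this]
    rw [h1]
    exact scan_eq N number 7 1 PySem.Dict.empty rfl (invC_empty N)
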